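-- pv_equiv track=rewrite | github.com/nobe0716/problem_solving | codejam/2020/kickstart/a/d.py | solve
-- ===== SOURCE A (Python) =====
-- from collections import defaultdict
--
-- Trie = lambda: [defaultdict(Trie), 0]
--
-- def add(head: Trie, str: str) -> None:
--     node = head
--     for i, e in enumerate(str):
--         node = node[0][e]
--         node[1] += 1
--
-- def solve(n, k, words):
--     def traverse(node: Trie, level: int):
--         total_number_of_words = 0
--         total_score = 0
--         for key in node[0].keys():
--             count, score = traverse(node[0][key], level + 1)
--             total_number_of_words += count
--             total_score += score
--
--         current_level_bundle_count = (node[1] - total_number_of_words) // k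
--         total_number_of_words += (current_level_bundle_count * k)
--         total_score += (level * current_level_bundle_count)
--         return total_number_of_words, total_score
--
--     head = Trie()
--     for w in words:
--         add(head, w)
--     return traverse(head, 0)
-- ===== SOURCE B (Python) =====
-- def solve(n, k, words):
--     def rec(suffixes, depth, cnt):
--         buckets = {}
--         for s in suffixes:
--             if s:
--                 buckets.setdefault(s[0], []).append(s[1:])
--         consumed = 0
--         score = 0
--         for tails in buckets.values():
--             c, sc = rec(tails, depth + 1, len(tails))
--             consumed += c
--             score += sc
--         bundles = (cnt - consumed) // k
--         return consumed + bundles * k, score + depth * bundles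
--     return rec(list(words), 0, 0)
-- ===== Notes on version B (the rewrite author's own statement) =====
-- stated objective: simpler
-- what changed: Replaces the mutable trie (built word-by-word with add, then traversed) by a single top-down divide-and-conquer recursion that groups the current suffixes by first character and recurses on each group, so no trie structure is ever built.
import Mathlib
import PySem

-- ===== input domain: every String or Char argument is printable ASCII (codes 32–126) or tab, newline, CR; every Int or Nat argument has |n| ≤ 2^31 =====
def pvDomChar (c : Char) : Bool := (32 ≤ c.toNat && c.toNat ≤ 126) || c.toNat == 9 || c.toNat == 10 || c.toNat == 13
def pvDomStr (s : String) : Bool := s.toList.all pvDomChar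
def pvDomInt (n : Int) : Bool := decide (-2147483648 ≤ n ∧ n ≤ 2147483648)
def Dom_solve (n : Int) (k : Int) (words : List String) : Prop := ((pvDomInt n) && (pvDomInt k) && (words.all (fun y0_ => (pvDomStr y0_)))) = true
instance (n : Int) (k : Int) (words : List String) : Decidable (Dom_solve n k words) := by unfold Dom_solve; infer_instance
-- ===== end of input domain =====

-- B removes the trie: instead of building a mutable trie and traversing it, it recurses
-- directly on the list of suffixes, grouping by first character (objective: simpler).

-- ===== PORT A =====
-- Trie = [children (insertion-ordered dict Char -> Trie), count]; ported as a mutual pair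
-- (nested inductives are not allowed).
mutual
inductive PTrie where
  | node : Int → PChildren → PTrie
inductive PChildren where
  | nil : PChildren
  | cons : Char → PTrie → PChildren → PChildren
end

def incrT : PTrie → PTrie
  | .node m ch => .node (m + 1) ch

-- add(head, str): descend, creating a fresh child (count 0) on a missing key (defaultdict),
-- incrementing each visited child's count.
mutual
def addInto : PTrie → List Char → PTrie
  | t, [] => t
  | .node cnt ch, c :: rest => .node cnt (addChild ch c rest)
  termination_by t cs => (cs.length, 0, 0)
  decreasing_by all_goals simp_all [Prod.lex_def]
def addChild : PChildren → Char → List Char → PChildren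
  | .nil, c, rest => .cons c (addInto (.node 1 .nil) rest) .nil
  | .cons c' t ch, c, rest =>
    if c' = c then
      .cons c' (addInto (incrT t) rest) ch
    else
      .cons c' t (addChild ch c rest)
  termination_by ch c rest => (rest.length, 1, sizeOf ch)
  decreasing_by all_goals simp_all [Prod.lex_def]
end

-- traverse(node, level): left-fold over the children accumulating (count, score), then
-- add this level's bundles ((node[1] - total)//k, Python floor division).
mutual
def traverseT (k : Int) : PTrie → Int → Int × Int
  | .node cnt ch, level =>
    let acc := travChildren k ch level (0, 0)
    let b := PySem.Int.floordiv (cnt - acc.1) k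
    (acc.1 + b * k, acc.2 + level * b)
def travChildren (k : Int) : PChildren → Int → Int × Int → Int × Int
  | .nil, _, acc => acc
  | .cons _ t ch, level, acc =>
    let r := traverseT k t (level + 1)
    travChildren k ch level (acc.1 + r.1, acc.2 + r.2)
end

def solve (n : Int) (k : Int) (words : List String) : Int × Int :=
  let head := words.foldl (fun t w => addInto t w.toList) (.node 0 .nil)
  traverseT k head 0

-- ===== PORT B =====
-- buckets.setdefault(s[0], []).append(s[1:]) on an insertion-ordered dict of lists.
def addBucket : List (Char × List (List Char)) → Char → List Char → List (Char × List (List Char))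
  | [], c, t => [(c, [t])]
  | (c', ts) :: bs, c, t =>
    if c' = c then (c', ts ++ [t]) :: bs else (c', ts) :: addBucket bs c t

def mkBuckets (ss : List (List Char)) : List (Char × List (List Char)) :=
  ss.foldl (fun bs s => match s with | [] => bs | c :: t => addBucket bs c t) []

-- rec(suffixes, depth, cnt) of Source B; the Nat fuel only makes the recursion structural
-- (any fuel exceeding every suffix length is enough, and solve_alt supplies one).
def recB (k : Int) : Nat → List (List Char) → Int → Int → Int × Int
  | 0, _, depth, cnt =>
    let bundles := PySem.Int.floordiv (cnt - 0) k
    (0 + bundles * k, 0 + depth * bundles)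
  | fuel + 1, ss, depth, cnt =>
    let bs := mkBuckets ss
    let acc := bs.foldl (fun (acc : Int × Int) b =>
      let r := recB k fuel b.2 (depth + 1) (b.2.length : Int)
      (acc.1 + r.1, acc.2 + r.2)) (0, 0)
    let bundles := PySem.Int.floordiv (cnt - acc.1) k
    (acc.1 + bundles * k, acc.2 + depth * bundles)

def solve_alt (n : Int) (k : Int) (words : List String) : Int × Int :=
  let fuel := (words.foldl (fun m w => max m w.toList.length) 0) + 1
  recB k fuel (words.map String.toList) 0 0

-- ===== PRECONDITION & SPEC =====
-- Python A raises ZeroDivisionError when k == 0 (the root division always runs); excluded.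
def Pre_solve (n : Int) (k : Int) (words : List String) : Prop := k ≠ 0
instance (n : Int) (k : Int) (words : List String) : Decidable (Pre_solve n k words) := by unfold Pre_solve; infer_instance
def pvWitness_solve : Int × Int × List String := (3, 2, ["ab", "ac", "a"])

def Spec_solve (n : Int) (k : Int) (words : List String) (out : Int × Int) : Prop := out = solve_alt n k words
instance (n : Int) (k : Int) (words : List String) (out : Int × Int) : Decidable (Spec_solve n k words out) := by unfold Spec_solve; infer_instance

-- ===== CLAIM (what is proved, stated in full; the proofs are below) =====
def Claim_equal_solve : Prop := ∀ (n : Int) (k : Int) (words : List String), Dom_solve n k words → Pre_solve n k words → Spec_solve n k words (solve n k words)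

-- ===== LEMMAS AND PROOFS =====

-- The "grouped" trie: the trie that solve's foldl of addInto actually builds, described
-- top-down by the same bucket grouping recB uses.
mutual
def gT (cnt : Int) : Nat → List (List Char) → PTrie
  | 0, _ => .node cnt .nil
  | fuel + 1, ss => .node cnt (gChildren fuel (mkBuckets ss))
def gChildren (fuel : Nat) : List (Char × List (List Char)) → PChildren
  | [] => .nil
  | (c, ts) :: bs => .cons c (gT (ts.length : Int) fuel ts) (gChildren fuel bs)
end

theorem incr_gT (cnt : Int) (fuel : Nat) (ss : List (List Char)) :
    incrT (gT cnt fuel ss) = gT (cnt + 1) fuel ss := by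
  cases fuel <;> simp [gT, incrT]

-- Inserting one word into the grouped trie regroups it (the heart of the A-side proof).
theorem addInto_gT (fuel : Nat) :
    ∀ (cnt : Int) (ss : List (List Char)) (w : List Char), w.length ≤ fuel →
      addInto (gT cnt fuel ss) w = gT cnt fuel (ss ++ [w]) := by
  induction fuel with
  | zero =>
    intro cnt ss w hw
    have : w = [] := List.eq_nil_of_length_eq_zero (Nat.le_zero.mp hw)
    subst this; simp [gT, addInto]
  | succ fuel ih =>
    intro cnt ss w hw
    cases w with
    | nil => simp [gT, addInto, mkBuckets]
    | cons c t =>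
      simp only [gT, addInto]
      have ht : t.length ≤ fuel := by simpa using hw
      have hbk : ∀ bs, addChild (gChildren fuel bs) c t = gChildren fuel (addBucket bs c t) := by
        intro bs
        induction bs with
        | nil =>
          have h1 : addInto (PTrie.node 1 .nil) t = gT 1 fuel [t] := by
            have := ih 1 [] t ht
            cases fuel <;> simpa [gT, mkBuckets, gChildren] using this
          simp [gChildren, addChild, addBucket, h1]
        | cons b bs ihb =>
          obtain ⟨c', ts⟩ := b
          by_cases hc : c' = c
          · subst hc
            simp [gChildren, addChild, addBucket, incr_gT, ih (ts.length + 1) ts t ht]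
          · simp [gChildren, addChild, addBucket, hc, ihb]
      have hbuckets : mkBuckets (ss ++ [c :: t]) = addBucket (mkBuckets ss) c t := by
        simp [mkBuckets, List.foldl_append]
      rw [hbk, hbuckets]

-- The foldl in solve builds exactly the grouped trie (root count 0).
theorem foldl_addInto_gT (fuel : Nat) (ws : List (List Char))
    (h : ∀ w ∈ ws, w.length ≤ fuel) :
    ∀ pre, ws.foldl addInto (gT 0 fuel pre) = gT 0 fuel (pre ++ ws) := by
  induction ws with
  | nil => intro pre; simp
  | cons w ws ihw =>
    intro pre
    have hw : w.length ≤ fuel := h w (by simp)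
    have := ihw (fun x hx => h x (by simp [hx])) (pre ++ [w])
    simp only [List.foldl_cons, addInto_gT fuel 0 pre w hw, this, List.append_assoc,
      List.singleton_append]

-- Traversing the grouped trie is exactly B's recursion.
theorem traverse_gT (k : Int) (fuel : Nat) :
    ∀ (ss : List (List Char)) (cnt level : Int),
      traverseT k (gT cnt fuel ss) level = recB k fuel ss level cnt := by
  induction fuel with
  | zero => intro ss cnt level; simp [gT, recB, traverseT, travChildren]
  | succ fuel ih =>
    intro ss cnt level
    simp only [gT, recB, traverseT]
    have : ∀ bs (acc : Int × Int),
        travChildren k (gChildren fuel bs) level acc =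
          bs.foldl (fun (acc : Int × Int) b =>
            let r := recB k fuel b.2 (level + 1) (b.2.length : Int)
            (acc.1 + r.1, acc.2 + r.2)) acc := by
      intro bs
      induction bs with
      | nil => intro acc; simp [gChildren, travChildren]
      | cons b bs ihb =>
        intro acc
        obtain ⟨c, ts⟩ := b
        simp [gChildren, travChildren, ih, ihb]
    rw [this]

theorem foldl_max_le (ws : List String) :
    ∀ m : Nat, m ≤ ws.foldl (fun m w => max m w.toList.length) m := by
  induction ws with
  | nil => intro m; simp
  | cons y ys ihy =>
    intro m
    exact le_trans (le_max_left _ _) (ihy (max m y.toList.length))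

theorem max_fold_bound (ws : List String) :
    ∀ (m : Nat), ∀ w ∈ ws, w.toList.length ≤ ws.foldl (fun m w => max m w.toList.length) m := by
  induction ws with
  | nil => intro m w hw; cases hw
  | cons x ws ihw =>
    intro m w hw
    rcases List.mem_cons.mp hw with hw | hw
    · subst hw
      exact le_trans (le_max_right m _) (foldl_max_le ws _)
    · exact ihw _ w hw

-- ===== VERDICT (by name: the statement is the Claim_ definition above) =====
theorem solve_spec : Claim_equal_solve := by
  intro n k words _ _
  unfold Spec_solve solve solve_alt
  set fuel := (words.foldl (fun m w => max m w.toList.length) 0) + 1 with hfuel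
  have hb : ∀ w ∈ words.map String.toList, w.length ≤ fuel := by
    intro w hw
    rcases List.mem_map.mp hw with ⟨s, hs, rfl⟩
    exact le_trans (max_fold_bound words 0 s hs) (Nat.le_succ _)
  have hstart : (PTrie.node 0 .nil) = gT 0 fuel [] := by
    simp [hfuel, gT, mkBuckets, gChildren]
  have hfold : words.foldl (fun t w => addInto t w.toList) (.node 0 .nil)
      = gT 0 fuel (words.map String.toList) := by
    rw [hstart]
    have := foldl_addInto_gT fuel (words.map String.toList) hb []
    simpa [List.foldl_map] using this
  simp only [hfold, traverse_gT]
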